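-- pv_equiv track=rewrite | github.com/Prad1got/Analysis | code/sbertonly_sci-310.py | removepun
-- ===== SOURCE A (Python) =====
-- import string
--
-- def removepun(stringinp: str) -> str:
--     """
--     Remove punctuation marks and other special characters and
--     escape sequences from text in order to avoid scoring errors.
--
--     Arguments:
--         stringinp (str): The text to be cleaned
--
--     Returns:
--         stringinp (str): The cleaned text
--     """
--     for character in string.punctuation:
--         stringinp = stringinp.replace(character, '')
--     stringinp = stringinp.replace('\n',"")
--     stringinp = stringinp.replace('\n ',"")
--     stringinp = stringinp.replace(' \n ',"")
--     stringinp = stringinp.replace('\n ',"")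
--     stringinp = stringinp.replace('\\n',"")
--     stringinp = stringinp.replace(' \\n',"")
--     stringinp = stringinp.replace('\t',"")
--
--     return stringinp.replace(" ", "")
-- ===== SOURCE B (Python) =====
-- import string
--
-- def removepun(stringinp: str) -> str:
--     """Single pass: delete every punctuation/whitespace character via one translation table."""
--     bad = ''.join(set(string.punctuation) | {'\n', '\t', ' '})
--     return stringinp.translate(str.maketrans('', '', bad))
-- ===== Notes on version B (the rewrite author's own statement) =====
-- stated objective: idiomatic
-- what changed: Replaced A's ~40 sequential whole-string .replace() passes by one precomputed deletion set applied in a single str.translate pass over the input.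
import Mathlib
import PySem

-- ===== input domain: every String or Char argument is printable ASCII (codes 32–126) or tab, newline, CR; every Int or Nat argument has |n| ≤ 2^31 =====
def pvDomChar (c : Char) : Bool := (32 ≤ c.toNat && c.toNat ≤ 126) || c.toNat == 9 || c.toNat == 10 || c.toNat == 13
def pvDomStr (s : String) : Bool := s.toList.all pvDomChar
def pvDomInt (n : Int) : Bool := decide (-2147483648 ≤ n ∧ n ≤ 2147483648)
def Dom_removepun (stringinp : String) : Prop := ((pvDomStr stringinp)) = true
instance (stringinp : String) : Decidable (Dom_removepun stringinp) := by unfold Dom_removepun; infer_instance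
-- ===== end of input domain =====

-- B changes the algorithm: one pass deleting every character of a precomputed deletion set (str.translate) instead of A's ~40 sequential whole-string replace passes.

-- ===== PORT A =====
-- string.punctuation, as a list of characters (in Python's order)
def punctChars : List Char :=
  ['!', '"', '#', '$', '%', '&', '\'', '(', ')', '*', '+', ',', '-', '.', '/',
   ':', ';', '<', '=', '>', '?', '@', '[', '\\', ']', '^', '_', '`', '{', '|', '}', '~']

-- literal port of A: the for-loop over string.punctuation, then the eight explicit replaces
def removepun (stringinp : String) : String :=
  let s1 := punctChars.foldl (fun s c => PySem.Str.replace s (String.ofList [c]) "") stringinp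
  let s2 := PySem.Str.replace s1 "\n" ""
  let s3 := PySem.Str.replace s2 "\n " ""
  let s4 := PySem.Str.replace s3 " \n " ""
  let s5 := PySem.Str.replace s4 "\n " ""
  let s6 := PySem.Str.replace s5 "\\n" ""
  let s7 := PySem.Str.replace s6 " \\n" ""
  let s8 := PySem.Str.replace s7 "\t" ""
  PySem.Str.replace s8 " " ""

-- ===== PORT B =====
-- the deletion set: string.punctuation plus newline, tab, space
def badChars : List Char := punctChars ++ ['\n', '\t', ' ']

-- literal port of B: translate with an all-deletion table = one pass keeping only characters not in the deletion set
def removepun_alt (stringinp : String) : String :=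
  String.ofList (stringinp.toList.filter (fun c => !(badChars.contains c)))

-- ===== PRECONDITION & SPEC =====
def Spec_removepun (stringinp : String) (out : String) : Prop := out = removepun_alt stringinp
instance (stringinp : String) (out : String) : Decidable (Spec_removepun stringinp out) := by unfold Spec_removepun; infer_instance

-- ===== CLAIM (what is proved, stated in full; the proofs are below) =====
def Claim_equal_removepun : Prop := ∀ (stringinp : String), Dom_removepun stringinp → Spec_removepun stringinp (removepun stringinp)

-- ===== LEMMAS AND PROOFS =====

-- replace.go with a single-character pattern and empty replacement is a filter
theorem replace_go_single (c : Char) (l acc : List Char) (fuel : Nat) (h : l.length ≤ fuel) :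
    PySem.Chars.replace.go [c] [] fuel l acc = acc.reverse ++ l.filter (fun x => !(x == c)) := by
  induction l generalizing acc fuel with
  | nil => cases fuel <;> simp [PySem.Chars.replace.go]
  | cons x t ih =>
    cases fuel with
    | zero => simp at h
    | succ n =>
      simp only [PySem.Chars.replace.go]
      by_cases hx : x = c
      · subst hx
        rw [if_pos (by simp [List.isPrefixOf])]
        simp only [List.length_cons, List.drop_succ_cons, List.drop_zero, List.length_nil,
          List.reverse_nil, List.nil_append]
        rw [ih acc n (by simp at h; omega)]
        simp [List.filter]
      · rw [if_neg (by simp [List.isPrefixOf]; exact fun h' => hx h'.symm)]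
        rw [ih (x :: acc) n (by simp at h; omega)]
        have hb : (x == c) = false := by simp [hx]
        simp [List.filter, hb]

theorem replace_single (c : Char) (l : List Char) :
    PySem.Chars.replace l [c] [] = l.filter (fun x => !(x == c)) := by
  simp [PySem.Chars.replace, replace_go_single c l [] l.length le_rfl]

-- replace is the identity when the pattern contains a character absent from the string
theorem replace_go_absent (old new : List Char) (c : Char) (hc : c ∈ old)
    (l acc : List Char) (fuel : Nat) (hcl : c ∉ l) :
    PySem.Chars.replace.go old new fuel l acc = acc.reverse ++ l := by
  induction l generalizing acc fuel with
  | nil => cases fuel <;> simp [PySem.Chars.replace.go]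
  | cons x t ih =>
    cases fuel with
    | zero => simp [PySem.Chars.replace.go]
    | succ n =>
      simp only [PySem.Chars.replace.go]
      rw [if_neg]
      · have := ih (x :: acc) n (by simp at hcl; simp [hcl])
        simp [this]
      · intro hpre
        rw [List.isPrefixOf_iff_prefix] at hpre
        exact hcl (hpre.subset hc)

theorem replace_absent (old new l : List Char) (c : Char) (hc : c ∈ old) (hcl : c ∉ l) :
    PySem.Chars.replace l old new = l := by
  have hne : old.isEmpty = false := by cases old with | nil => cases hc | cons a t => rfl
  simp [PySem.Chars.replace, hne, replace_go_absent old new c hc l [] l.length hcl]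

-- folding single-character deletions over a character list is one filter by non-membership
theorem foldl_filter_chars (cs l : List Char) :
    cs.foldl (fun s c => s.filter (fun x => !(x == c))) l
      = l.filter (fun x => !(cs.contains x)) := by
  induction cs generalizing l with
  | nil => simp
  | cons c t ih =>
    simp only [List.foldl_cons, ih, List.filter_filter]
    apply List.filter_congr
    intro x _
    by_cases hxc : x = c <;> by_cases hxt : x ∈ t <;> simp [hxc, hxt]

-- the A-side foldl over punctuation, moved to character lists
theorem foldl_replace_toList (cs : List Char) (s : String) :
    (cs.foldl (fun s c => String.ofList (PySem.Chars.replace s.toList [c] [])) s).toList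
      = cs.foldl (fun l c => l.filter (fun x => !(x == c))) s.toList := by
  induction cs generalizing s with
  | nil => rfl
  | cons c t ih =>
    rw [List.foldl_cons, ih, String.toList_ofList, replace_single, List.foldl_cons]

set_option maxRecDepth 8192 in
set_option maxHeartbeats 1600000 in
theorem removepun_spec : Claim_equal_removepun := by
  intro s _
  unfold Spec_removepun removepun removepun_alt
  simp only [PySem.Str.replace, String.toList_ofList]
  refine congrArg String.ofList ?_
  simp only [show ("" : String).toList = ([] : List Char) from rfl]
  rw [foldl_replace_toList, foldl_filter_chars]
  rw [show ("\n" : String).toList = ['\n'] from rfl,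
      show ("\n " : String).toList = ['\n', ' '] from rfl,
      show (" \n " : String).toList = [' ', '\n', ' '] from rfl,
      show ("\\n" : String).toList = ['\\', 'n'] from rfl,
      show (" \\n" : String).toList = [' ', '\\', 'n'] from rfl,
      show ("\t" : String).toList = ['\t'] from rfl,
      show (" " : String).toList = [' '] from rfl]
  rw [replace_single '\n']
  set l2 := (s.toList.filter (fun x => !(punctChars.contains x))).filter
      (fun x => !(x == '\n')) with hl2
  have hnl : '\n' ∉ l2 := by simp [hl2, List.mem_filter]
  have hbs : '\\' ∉ l2 := by
    simp only [hl2, List.mem_filter]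
    rintro ⟨⟨-, h⟩, -⟩
    simp [punctChars] at h
  rw [replace_absent ['\n', ' '] [] l2 '\n' (by simp) hnl]
  rw [replace_absent [' ', '\n', ' '] [] l2 '\n' (by simp) hnl]
  rw [replace_absent ['\n', ' '] [] l2 '\n' (by simp) hnl]
  rw [replace_absent ['\\', 'n'] [] l2 '\\' (by simp) hbs]
  rw [replace_absent [' ', '\\', 'n'] [] l2 '\\' (by simp) hbs]
  rw [replace_single '\t', replace_single ' ']
  rw [hl2]
  simp only [List.filter_filter]
  apply List.filter_congr
  intro x _
  by_cases hm : x ∈ punctChars <;> by_cases h1 : x = '\n' <;>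
    by_cases h2 : x = '\t' <;> by_cases h3 : x = ' ' <;>
    simp [badChars, hm, h1, h2, h3]
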